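-- pv_equiv track=rewrite | github.com/BAMDH/Cosas_Uni | Intro programación/Prácticas/Notebooks_jupyter/Recursividad_1/concatenarNumeros.py | concatenarNumerosAux
-- ===== SOURCE A (Python) =====
-- def concatenarNumerosAux(numero1, numero2, potencia):
--     #numero2 es el numero menos significativo en el resultado
--     if(numero2 > 0):
--         divEntera2 = numero2 // 10;
--         residuo2 = numero2 % 10;
--
--         return (residuo2 * 10 ** potencia) + concatenarNumerosAux(numero1, divEntera2, potencia + 1);
--     elif(numero1 > 0):
--         divEntera1 = numero1 // 10;
--         residuo1 = numero1 % 10;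
--         return (residuo1 * 10 ** potencia) + concatenarNumerosAux(divEntera1, numero2, potencia + 1);
--     else:
--         return 0;
-- ===== SOURCE B (Python) =====
-- def concatenarNumerosAux(numero1, numero2, potencia):
--     result = 0
--     while numero2 > 0:
--         result += (numero2 % 10) * 10 ** potencia
--         numero2 //= 10
--         potencia += 1
--     while numero1 > 0:
--         result += (numero1 % 10) * 10 ** potencia
--         numero1 //= 10
--         potencia += 1
--     return result
-- ===== Notes on version B (the rewrite author's own statement) =====
-- stated objective: idiomatic
-- what changed: Replaces the flat two-branch recursion by two sequential iterative while-loops (numero2 first, then numero1) accumulating digits into a shared result with the running power counter.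
-- outside the precondition, e.g. on concatenarNumerosAux(1, 2, -1): A returns 1.2, B returns 1.2
import Mathlib
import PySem

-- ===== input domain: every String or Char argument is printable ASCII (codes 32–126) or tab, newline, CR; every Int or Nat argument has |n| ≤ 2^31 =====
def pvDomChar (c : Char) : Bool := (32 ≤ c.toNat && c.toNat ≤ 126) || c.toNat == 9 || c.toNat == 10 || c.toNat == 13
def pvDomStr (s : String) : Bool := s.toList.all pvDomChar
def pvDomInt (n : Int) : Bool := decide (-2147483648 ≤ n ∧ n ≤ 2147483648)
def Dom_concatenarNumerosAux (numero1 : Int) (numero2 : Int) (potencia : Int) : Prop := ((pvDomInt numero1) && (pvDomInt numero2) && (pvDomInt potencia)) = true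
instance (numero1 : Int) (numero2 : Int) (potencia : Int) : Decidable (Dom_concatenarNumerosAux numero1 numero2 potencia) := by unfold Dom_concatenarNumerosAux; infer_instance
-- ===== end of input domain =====

-- B replaces A's flat two-branch recursion by two sequential iterative while-loops
-- over a shared accumulator (objective: idiomatic); same return value on Pre_.

-- termination helper (cited by the ports' decreasing_by)
theorem pv_div10_toNat_lt (n : Int) (h : n > 0) : (PySem.Int.floordiv n 10).toNat < n.toNat := by
  rw [PySem.Int.floordiv_eq_ediv_of_pos (by norm_num)]
  omega

-- ===== PORT A =====
def concatenarNumerosAux (numero1 : Int) (numero2 : Int) (potencia : Int) : Int :=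
  if h2 : numero2 > 0 then
    let divEntera2 := PySem.Int.floordiv numero2 10
    let residuo2 := PySem.Int.mod numero2 10
    residuo2 * 10 ^ potencia.toNat + concatenarNumerosAux numero1 divEntera2 (potencia + 1)
  else if h1 : numero1 > 0 then
    let divEntera1 := PySem.Int.floordiv numero1 10
    let residuo1 := PySem.Int.mod numero1 10
    residuo1 * 10 ^ potencia.toNat + concatenarNumerosAux divEntera1 numero2 (potencia + 1)
  else
    0
termination_by numero1.toNat + numero2.toNat
decreasing_by
  · have := pv_div10_toNat_lt numero2 h2; omega
  · have := pv_div10_toNat_lt numero1 h1; omega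

-- ===== PORT B =====
-- one 'while n > 0' loop of Source B: returns (result, potencia) after the loop
def pvLoopB (n : Int) (potencia : Int) (result : Int) : Int × Int :=
  if h : n > 0 then
    pvLoopB (PySem.Int.floordiv n 10) (potencia + 1)
      (result + PySem.Int.mod n 10 * 10 ^ potencia.toNat)
  else (result, potencia)
termination_by n.toNat
decreasing_by
  exact pv_div10_toNat_lt n h

def concatenarNumerosAux_alt (numero1 : Int) (numero2 : Int) (potencia : Int) : Int :=
  let s2 := pvLoopB numero2 potencia 0
  (pvLoopB numero1 s2.2 s2.1).1

-- ===== PRECONDITION & SPEC =====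
-- Pre_ excludes potencia < 0 when a digit is actually placed: there '10 ** potencia'
-- is a Python float, so A (and B) return a float, not a value of the declared int type.
def Pre_concatenarNumerosAux (numero1 : Int) (numero2 : Int) (potencia : Int) : Prop :=
  0 ≤ potencia ∨ (numero1 ≤ 0 ∧ numero2 ≤ 0)
instance (numero1 : Int) (numero2 : Int) (potencia : Int) : Decidable (Pre_concatenarNumerosAux numero1 numero2 potencia) := by unfold Pre_concatenarNumerosAux; infer_instance

def pvWitness_concatenarNumerosAux : Int × Int × Int := (12, 34, 0)

def Spec_concatenarNumerosAux (numero1 : Int) (numero2 : Int) (potencia : Int) (out : Int) : Prop := out = concatenarNumerosAux_alt numero1 numero2 potencia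
instance (numero1 : Int) (numero2 : Int) (potencia : Int) (out : Int) : Decidable (Spec_concatenarNumerosAux numero1 numero2 potencia out) := by unfold Spec_concatenarNumerosAux; infer_instance

-- ===== CLAIM (what is proved, stated in full; the proofs are below) =====
def Claim_equal_concatenarNumerosAux : Prop := ∀ (numero1 : Int) (numero2 : Int) (potencia : Int), Dom_concatenarNumerosAux numero1 numero2 potencia → Pre_concatenarNumerosAux numero1 numero2 potencia → Spec_concatenarNumerosAux numero1 numero2 potencia (concatenarNumerosAux numero1 numero2 potencia)

-- ===== LEMMAS AND PROOFS =====

-- the loop accumulator is additive and the final potencia is independent of it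
theorem pvLoopB_acc (k : Nat) : ∀ (n p r : Int), n.toNat = k →
    pvLoopB n p r = (r + (pvLoopB n p 0).1, (pvLoopB n p 0).2) := by
  induction k using Nat.strong_induction_on with
  | _ k ih =>
    intro n p r hk
    by_cases h : n > 0
    · have hd := pv_div10_toNat_lt n h
      have er : pvLoopB n p r = pvLoopB (PySem.Int.floordiv n 10) (p + 1)
          (r + PySem.Int.mod n 10 * 10 ^ p.toNat) := by
        rw [pvLoopB]; simp only [h, dite_true]
      have e0 : pvLoopB n p 0 = pvLoopB (PySem.Int.floordiv n 10) (p + 1)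
          (0 + PySem.Int.mod n 10 * 10 ^ p.toNat) := by
        rw [pvLoopB]; simp only [h, dite_true]
      rw [er, e0, ih _ (by omega) _ _ _ rfl,
          ih _ (by omega) _ (p + 1) (0 + PySem.Int.mod n 10 * 10 ^ p.toNat) rfl]
      simp only [Prod.mk.injEq]
      exact ⟨by ring, trivial⟩
    · have er : pvLoopB n p r = (r, p) := by rw [pvLoopB]; simp only [h, dite_false]
      have e0 : pvLoopB n p 0 = (0, p) := by rw [pvLoopB]; simp only [h, dite_false]
      rw [er, e0]; simp

theorem pvLoopB_fst (n p r : Int) : (pvLoopB n p r).1 = r + (pvLoopB n p 0).1 := by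
  rw [pvLoopB_acc n.toNat n p r rfl]

theorem concat_eq_alt (k : Nat) : ∀ (n1 n2 p : Int), n1.toNat + n2.toNat = k →
    concatenarNumerosAux n1 n2 p = concatenarNumerosAux_alt n1 n2 p := by
  induction k using Nat.strong_induction_on with
  | _ k ih =>
    intro n1 n2 p hk
    rw [concatenarNumerosAux]
    by_cases h2 : n2 > 0
    · have hdec := pv_div10_toNat_lt n2 h2
      simp only [h2, dite_true]
      rw [ih (n1.toNat + (PySem.Int.floordiv n2 10).toNat) (by omega) _ _ (p + 1) rfl]
      simp only [concatenarNumerosAux_alt]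
      set X := pvLoopB (PySem.Int.floordiv n2 10) (p + 1) 0 with hX
      have hY : pvLoopB n2 p 0 =
          (0 + PySem.Int.mod n2 10 * 10 ^ p.toNat + X.1, X.2) := by
        rw [pvLoopB]; simp only [h2, dite_true]
        rw [hX]; exact pvLoopB_acc _ _ _ _ rfl
      rw [hY]
      rw [pvLoopB_fst n1 X.2 X.1,
          pvLoopB_fst n1 X.2 (0 + PySem.Int.mod n2 10 * 10 ^ p.toNat + X.1)]
      ring
    · by_cases h1 : n1 > 0
      · have hdec := pv_div10_toNat_lt n1 h1
        simp only [h2, h1, dite_true, dite_false]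
        rw [ih ((PySem.Int.floordiv n1 10).toNat + n2.toNat) (by omega) _ _ (p + 1) rfl]
        simp only [concatenarNumerosAux_alt]
        have hn2 : pvLoopB n2 p 0 = (0, p) := by rw [pvLoopB]; simp only [h2, dite_false]
        have hn2' : pvLoopB n2 (p + 1) 0 = (0, p + 1) := by
          rw [pvLoopB]; simp only [h2, dite_false]
        have hstep : pvLoopB n1 p 0 = pvLoopB (PySem.Int.floordiv n1 10) (p + 1)
            (0 + PySem.Int.mod n1 10 * 10 ^ p.toNat) := by
          rw [pvLoopB]; simp only [h1, dite_true]
        rw [hn2, hn2', hstep,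
            pvLoopB_fst (PySem.Int.floordiv n1 10) (p + 1)
              (0 + PySem.Int.mod n1 10 * 10 ^ p.toNat)]
        ring
      · simp only [h2, h1, dite_false]
        simp only [concatenarNumerosAux_alt]
        have hn2 : pvLoopB n2 p 0 = (0, p) := by rw [pvLoopB]; simp only [h2, dite_false]
        have hn1 : pvLoopB n1 p 0 = (0, p) := by rw [pvLoopB]; simp only [h1, dite_false]
        rw [hn2]
        simp [hn1]

-- ===== VERDICT (by name: the statement is the Claim_ definition above) =====
theorem concatenarNumerosAux_spec : Claim_equal_concatenarNumerosAux := by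
  intro n1 n2 p _ _
  unfold Spec_concatenarNumerosAux
  exact concat_eq_alt (n1.toNat + n2.toNat) n1 n2 p rfl
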